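-- pv_equiv track=rewrite | github.com/FilipBienkowski3/PythonBasics | Zestaw4/11.py | przyjaciolki
-- ===== SOURCE A (Python) =====
-- def are_friends(num1, num2):
--     return sorted(str(num1)) == sorted(str(num2))
--
-- def przyjaciolki(tab):
--     n = len(tab)
--     count = 0
--
--     for i in range(n):
--         for j in range(n):
--             neighbors = []
--             if i > 0:
--                 neighbors.append(tab[i-1][j])
--             if i < n-1:
--                 neighbors.append(tab[i+1][j])
--             if j > 0:
--                 neighbors.append(tab[i][j-1])
--             if j < n-1:
--                 neighbors.append(tab[i][j+1])
--
--             if all(are_friends(tab[i][j], neighbor) for neighbor in neighbors):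
--                 count += 1
--
--     return count
-- ===== SOURCE B (Python) =====
-- def _digits(x):
--     return sorted(str(x))
--
-- def przyjaciolki(tab):
--     n = len(tab)
--     bad = set()
--     for i in range(n):
--         for j in range(n):
--             if j + 1 < n and _digits(tab[i][j]) != _digits(tab[i][j + 1]):
--                 bad.add((i, j))
--                 bad.add((i, j + 1))
--             if i + 1 < n and _digits(tab[i][j]) != _digits(tab[i + 1][j]):
--                 bad.add((i, j))
--                 bad.add((i + 1, j))
--     return sum(1 for i in range(n) for j in range(n) if (i, j) not in bad)
-- ===== Notes on version B (the rewrite author's own statement) =====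
-- stated objective: alternative
-- what changed: Instead of gathering up to four neighbors per cell and testing each adjacency from both sides, B sweeps each right/down edge of the grid once, marks both endpoints of every non-anagram edge in a 'bad' set, and returns the number of cells not in that set.
import Mathlib
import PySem

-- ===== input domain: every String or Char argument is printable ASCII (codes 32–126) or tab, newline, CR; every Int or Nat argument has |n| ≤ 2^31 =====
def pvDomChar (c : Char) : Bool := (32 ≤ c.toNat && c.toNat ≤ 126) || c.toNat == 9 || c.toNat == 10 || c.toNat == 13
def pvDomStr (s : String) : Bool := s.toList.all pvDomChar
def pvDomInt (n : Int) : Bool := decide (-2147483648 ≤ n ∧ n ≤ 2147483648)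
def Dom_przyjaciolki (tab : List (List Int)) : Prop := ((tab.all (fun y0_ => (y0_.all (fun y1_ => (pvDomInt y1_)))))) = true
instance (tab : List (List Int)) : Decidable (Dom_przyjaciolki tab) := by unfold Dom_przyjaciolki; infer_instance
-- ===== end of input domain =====

-- B instead sweeps every right/down edge once, collects both endpoints of non-anagram edges
-- in a 'bad' set, and counts cells not in that set: one digit-sort comparison per edge instead of two.

-- ===== PORT A =====
-- shared helper: tab[i][j] for in-range nonnegative indices (Pre_ guarantees in-range)
def pvCell (tab : List (List Int)) (i j : Nat) : Int := (tab.getD i []).getD j 0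

-- sorted(str(num1)) == sorted(str(num2))
def areFriends (num1 num2 : Int) : Bool :=
  PySem.List.sorted (PySem.Int.toChars num1) (fun c => c) ==
  PySem.List.sorted (PySem.Int.toChars num2) (fun c => c)

-- the neighbors list A builds for cell (i, j)
def pvNbrs (tab : List (List Int)) (n i j : Nat) : List Int :=
  let neighbors : List Int := []
  let neighbors := if 0 < i then neighbors ++ [pvCell tab (i-1) j] else neighbors
  let neighbors := if i < n - 1 then neighbors ++ [pvCell tab (i+1) j] else neighbors
  let neighbors := if 0 < j then neighbors ++ [pvCell tab i (j-1)] else neighbors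
  if j < n - 1 then neighbors ++ [pvCell tab i (j+1)] else neighbors

def przyjaciolki (tab : List (List Int)) : Int :=
  let n := tab.length
  (List.range n).foldl (fun count i =>
    (List.range n).foldl (fun count j =>
      if (pvNbrs tab n i j).all (fun neighbor => areFriends (pvCell tab i j) neighbor)
      then count + 1 else count) count) 0

-- ===== PORT B =====
-- sorted(str(x))
def pvDigits (x : Int) : List Char :=
  PySem.List.sorted (PySem.Int.toChars x) (fun c => c)

-- the body of B's edge sweep at (i, j): mark endpoints of bad right/down edges
def pvMark (tab : List (List Int)) (n : Nat) (bad : PySem.Set (Nat × Nat)) (i j : Nat) :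
    PySem.Set (Nat × Nat) :=
  let bad := if j + 1 < n ∧ pvDigits (pvCell tab i j) ≠ pvDigits (pvCell tab i (j+1))
             then PySem.Set.add (PySem.Set.add bad (i, j)) (i, j+1) else bad
  if i + 1 < n ∧ pvDigits (pvCell tab i j) ≠ pvDigits (pvCell tab (i+1) j)
  then PySem.Set.add (PySem.Set.add bad (i, j)) (i+1, j) else bad

-- the 'bad' set after the full sweep
def pvBad (tab : List (List Int)) (n : Nat) : PySem.Set (Nat × Nat) :=
  (List.range n).foldl (fun bad i =>
    (List.range n).foldl (fun bad j => pvMark tab n bad i j) bad) PySem.Set.empty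

def przyjaciolki_alt (tab : List (List Int)) : Int :=
  let n := tab.length
  let bad := pvBad tab n
  (List.range n).foldl (fun s i =>
    (List.range n).foldl (fun s j =>
      if (i, j) ∈ bad then s else s + 1) s) 0

-- ===== PRECONDITION & SPEC =====
-- A indexes tab[i][j] for all i, j < len(tab): any row shorter than len(tab) raises IndexError.
def Pre_przyjaciolki (tab : List (List Int)) : Prop :=
  ∀ row ∈ tab, tab.length ≤ row.length
instance (tab : List (List Int)) : Decidable (Pre_przyjaciolki tab) := by
  unfold Pre_przyjaciolki; infer_instance

def pvWitness_przyjaciolki : List (List Int) := [[12, 21], [7, 121]]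

def Spec_przyjaciolki (tab : List (List Int)) (out : Int) : Prop := out = przyjaciolki_alt tab
instance (tab : List (List Int)) (out : Int) : Decidable (Spec_przyjaciolki tab out) := by
  unfold Spec_przyjaciolki; infer_instance

-- ===== CLAIM (what is proved, stated in full; the proofs are below) =====
def Claim_equal_przyjaciolki : Prop :=
  ∀ (tab : List (List Int)), Dom_przyjaciolki tab → Pre_przyjaciolki tab →
    Spec_przyjaciolki tab (przyjaciolki tab)

-- ===== LEMMAS AND PROOFS =====

-- the proposition "edge incident to x at (i, j) is bad", the per-step content of pvMark
def Touch (tab : List (List Int)) (n i j : Nat) (x : Nat × Nat) : Prop :=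
  (j + 1 < n ∧ pvDigits (pvCell tab i j) ≠ pvDigits (pvCell tab i (j+1)) ∧
     (x = (i, j) ∨ x = (i, j+1))) ∨
  (i + 1 < n ∧ pvDigits (pvCell tab i j) ≠ pvDigits (pvCell tab (i+1) j) ∧
     (x = (i, j) ∨ x = (i+1, j)))

theorem mem_pvMark (tab : List (List Int)) (n : Nat) (bad : PySem.Set (Nat × Nat))
    (i j : Nat) (x : Nat × Nat) :
    x ∈ pvMark tab n bad i j ↔ x ∈ bad ∨ Touch tab n i j x := by
  unfold pvMark Touch
  split_ifs with h1 h2 h2 <;> simp [PySem.Set.mem_add] <;> tauto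

theorem mem_foldl_iff (f : PySem.Set (Nat × Nat) → Nat → PySem.Set (Nat × Nat))
    (P : Nat → (Nat × Nat) → Prop)
    (hf : ∀ s a x, x ∈ f s a ↔ x ∈ s ∨ P a x) :
    ∀ (l : List Nat) (s : PySem.Set (Nat × Nat)) (x : Nat × Nat),
      x ∈ l.foldl f s ↔ x ∈ s ∨ ∃ a ∈ l, P a x := by
  intro l
  induction l with
  | nil => simp
  | cons a t ih =>
    intro s x
    simp only [List.foldl_cons, ih, hf, List.mem_cons]
    constructor
    · rintro ((h | h) | ⟨b, hb, h⟩)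
      · exact Or.inl h
      · exact Or.inr ⟨a, Or.inl rfl, h⟩
      · exact Or.inr ⟨b, Or.inr hb, h⟩
    · rintro (h | ⟨b, (rfl | hb), h⟩)
      · exact Or.inl (Or.inl h)
      · exact Or.inl (Or.inr h)
      · exact Or.inr ⟨b, hb, h⟩

theorem mem_pvBad (tab : List (List Int)) (n : Nat) (x : Nat × Nat) :
    x ∈ pvBad tab n ↔ ∃ i < n, ∃ j < n, Touch tab n i j x := by
  unfold pvBad
  rw [mem_foldl_iff _ (fun i x => ∃ j ∈ List.range n, Touch tab n i j x)
      (fun s a x => mem_foldl_iff _ (fun j x => Touch tab n a j x)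
        (fun s j x => mem_pvMark tab n s a j x) (List.range n) s x)]
  simp [PySem.Set.empty, List.mem_range]

-- the per-cell condition A tests, spelled out as four implications
def GoodA (tab : List (List Int)) (n i j : Nat) : Prop :=
  (0 < i → pvDigits (pvCell tab i j) = pvDigits (pvCell tab (i-1) j)) ∧
  (i < n - 1 → pvDigits (pvCell tab i j) = pvDigits (pvCell tab (i+1) j)) ∧
  (0 < j → pvDigits (pvCell tab i j) = pvDigits (pvCell tab i (j-1))) ∧
  (j < n - 1 → pvDigits (pvCell tab i j) = pvDigits (pvCell tab i (j+1)))

theorem areFriends_iff (u v : Int) : areFriends u v = true ↔ pvDigits u = pvDigits v := by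
  simp [areFriends, pvDigits]

theorem all_pvNbrs (tab : List (List Int)) (n i j : Nat) :
    ((pvNbrs tab n i j).all (fun neighbor => areFriends (pvCell tab i j) neighbor) = true)
      ↔ GoodA tab n i j := by
  unfold pvNbrs GoodA
  split_ifs with h1 h2 h3 h4 <;> simp_all [areFriends_iff]

theorem good_iff_not_bad (tab : List (List Int)) (n i j : Nat) (hi : i < n) (hj : j < n) :
    GoodA tab n i j ↔ (i, j) ∉ pvBad tab n := by
  rw [mem_pvBad]
  constructor
  · rintro ⟨hup, hdown, hleft, hright⟩ ⟨a, ha, b, hb, T⟩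
    rcases T with ⟨hbn, hne, heq | heq⟩ | ⟨han, hne, heq | heq⟩ <;>
      rw [Prod.mk.injEq] at heq <;> obtain ⟨h1, h2⟩ := heq
    · subst h1; subst h2
      exact hne (hright (by omega))
    · obtain rfl : a = i := h1.symm
      obtain rfl : b = j - 1 := by omega
      rw [Nat.sub_add_cancel (by omega)] at hne
      exact hne (hleft (by omega)).symm
    · subst h1; subst h2
      exact hne (hdown (by omega))
    · obtain rfl : b = j := h2.symm
      obtain rfl : a = i - 1 := by omega
      rw [Nat.sub_add_cancel (by omega)] at hne
      exact hne (hup (by omega)).symm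
  · intro hnb
    refine ⟨?_, ?_, ?_, ?_⟩
    · intro h0
      by_contra hf
      exact hnb ⟨i - 1, by omega, j, hj, Or.inr
        ⟨by omega, by simpa [Nat.sub_add_cancel h0] using fun he => hf he.symm,
         Or.inr (by rw [Prod.mk.injEq]; omega)⟩⟩
    · intro h0
      by_contra hf
      exact hnb ⟨i, hi, j, hj, Or.inr ⟨by omega, hf, Or.inl rfl⟩⟩
    · intro h0
      by_contra hf
      exact hnb ⟨i, hi, j - 1, by omega, Or.inl
        ⟨by omega, by simpa [Nat.sub_add_cancel h0] using fun he => hf he.symm,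
         Or.inr (by rw [Prod.mk.injEq]; omega)⟩⟩
    · intro h0
      by_contra hf
      exact hnb ⟨i, hi, j, hj, Or.inl ⟨by omega, hf, Or.inl rfl⟩⟩

theorem cell_eq (tab : List (List Int)) (n i j : Nat) (hi : i < n) (hj : j < n) (acc : Int) :
    (if (pvNbrs tab n i j).all (fun neighbor => areFriends (pvCell tab i j) neighbor)
     then acc + 1 else acc)
    = (if (i, j) ∈ pvBad tab n then acc else acc + 1) := by
  by_cases h : GoodA tab n i j
  · rw [if_pos ((all_pvNbrs tab n i j).mpr h),
        if_neg ((good_iff_not_bad tab n i j hi hj).mp h)]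
  · rw [if_neg (fun hc => h ((all_pvNbrs tab n i j).mp hc)),
        if_pos (by
          by_contra hc
          exact h ((good_iff_not_bad tab n i j hi hj).mpr hc))]

theorem main_eq (tab : List (List Int)) : przyjaciolki tab = przyjaciolki_alt tab := by
  unfold przyjaciolki przyjaciolki_alt
  apply PySem.List.foldl_congr_mem
  intro acc i hi
  apply PySem.List.foldl_congr_mem
  intro acc2 j hj
  rw [List.mem_range] at hi hj
  exact cell_eq tab tab.length i j hi hj acc2

-- ===== VERDICT (by name: the statement is the Claim_ definition above) =====
theorem przyjaciolki_spec : Claim_equal_przyjaciolki := by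
  intro tab _ _
  unfold Spec_przyjaciolki
  exact main_eq tab
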